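-- pv_equiv track=rewrite | github.com/slotza007/test | software_testing/funny_string/funny_string.py | funny_String
-- ===== SOURCE A (Python) =====
-- def funny_String(s):
--     r=s[::-1]
--     s_list = []
--     r_list = []
--     for i in range(0,len(r)-1):
--         s_list.append(abs(ord(s[i])-ord(s[i+1])))
--         r_list.append(abs(ord(r[i])-ord(r[i+1])))
--     if s_list == r_list :
--         return 'Funny'
--     else:
--         return 'Not Funny'
-- ===== SOURCE B (Python) =====
-- def funny_String(s):
--     diffs = [abs(ord(a) - ord(b)) for a, b in zip(s, s[1:])]
--     while len(diffs) > 1: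
--         if diffs[0] != diffs[-1]:
--             return 'Not Funny'
--         diffs = diffs[1:-1]
--     return 'Funny'
-- ===== Notes on version B (the rewrite author's own statement) =====
-- stated objective: simpler
-- what changed: B builds only one list of adjacent absolute character differences and checks it is a palindrome by shrinking from both ends (stopping at the first mismatch), instead of building a second difference list from the reversed string and comparing the two lists.
import Mathlib
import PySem

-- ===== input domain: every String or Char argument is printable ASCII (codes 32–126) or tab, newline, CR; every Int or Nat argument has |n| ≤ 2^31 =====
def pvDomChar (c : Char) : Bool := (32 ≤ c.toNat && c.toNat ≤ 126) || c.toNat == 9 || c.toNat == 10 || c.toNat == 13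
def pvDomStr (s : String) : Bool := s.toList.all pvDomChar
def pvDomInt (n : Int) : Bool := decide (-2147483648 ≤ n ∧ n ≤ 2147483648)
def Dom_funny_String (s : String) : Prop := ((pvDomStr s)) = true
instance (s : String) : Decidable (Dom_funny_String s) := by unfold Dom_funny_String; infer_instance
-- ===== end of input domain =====

-- B builds a single adjacent-difference list and decides 'Funny' by a shrink-from-both-ends
-- palindrome check, instead of A's two lists (string and reversed string) compared for equality.

-- ===== PORT A =====
-- ord(x[i]) for an Int index i (the index is always in range inside A's loop)
def pvOrdAt (cs : List Char) (i : Int) : Int := (((PySem.List.pyGet? cs i).getD ' ').toNat : Int)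

def funny_String (s : String) : String :=
  let cs := s.toList
  let rs := cs.reverse
  let p := (PySem.List.pyRange 0 ((rs.length : Int) - 1) 1).foldl
      (fun (p : List Int × List Int) i =>
        (p.1 ++ [((pvOrdAt cs i - pvOrdAt cs (i + 1)).natAbs : Int)],
         p.2 ++ [((pvOrdAt rs i - pvOrdAt rs (i + 1)).natAbs : Int)]))
      ([], [])
  if p.1 = p.2 then "Funny" else "Not Funny"

-- ===== PORT B =====
-- diffs = [abs(ord(a) - ord(b)) for a, b in zip(s, s[1:])]
def pvDiffs (cs : List Char) : List Int :=
  List.zipWith (fun a b => (((a.toNat : Int) - (b.toNat : Int)).natAbs : Int)) cs cs.tail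

-- while len(diffs) > 1: compare the two ends, then shrink diffs = diffs[1:-1]
def pvPal (d : List Int) : Bool :=
  match d with
  | [] => true
  | [_] => true
  | a :: b :: rest =>
      if a = (b :: rest).getLast (List.cons_ne_nil b rest) then pvPal (b :: rest).dropLast
      else false
termination_by d.length
decreasing_by simp

def funny_String_alt (s : String) : String :=
  if pvPal (pvDiffs s.toList) then "Funny" else "Not Funny"

-- ===== PRECONDITION & SPEC =====
def Spec_funny_String (s : String) (out : String) : Prop := out = funny_String_alt s
instance (s : String) (out : String) : Decidable (Spec_funny_String s out) := by unfold Spec_funny_String; infer_instance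

-- ===== CLAIM (what is proved, stated in full; the proofs are below) =====
def Claim_equal_funny_String : Prop := ∀ (s : String), Dom_funny_String s → Spec_funny_String s (funny_String s)

-- ===== LEMMAS AND PROOFS =====

-- A's loop appends one element to each of the two lists per iteration
theorem pv_foldl_pair {α : Type} (l : List α) (f g : α → Int) (a b : List Int) :
    l.foldl (fun (p : List Int × List Int) i => (p.1 ++ [f i], p.2 ++ [g i])) (a, b)
      = (a ++ l.map f, b ++ l.map g) := by
  induction l generalizing a b with
  | nil => simp
  | cons x xs ih => simp [List.foldl_cons, ih]

theorem pvOrdAt_eq (cs : List Char) (k : Nat) (hk : k < cs.length) :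
    pvOrdAt cs (k : Int) = (cs[k].toNat : Int) := by
  simp [pvOrdAt, hk]

-- A's s_list is B's diffs list
theorem pv_slist_eq (cs : List Char) :
    (List.range (cs.length - 1)).map
      (fun k : Nat => ((pvOrdAt cs (k : Int) - pvOrdAt cs ((k : Int) + 1)).natAbs : Int))
      = pvDiffs cs := by
  apply List.ext_getElem
  · simp [pvDiffs]
  · intro k h1 h2
    have hk : k < cs.length - 1 := by simpa using h1
    have hA : pvOrdAt cs (k : Int) = (cs[k].toNat : Int) := pvOrdAt_eq cs k (by omega)
    have hcast : ((k : Int) + 1) = ((k + 1 : Nat) : Int) := by push_cast; ring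
    have hB : pvOrdAt cs ((k : Int) + 1) = (cs[k+1].toNat : Int) := by
      rw [hcast]; exact pvOrdAt_eq cs (k+1) (by omega)
    simp [pvDiffs, List.getElem_zipWith, List.getElem_tail, hA, hB]

-- A's r_list is B's diffs list reversed
theorem pv_rlist_eq (cs : List Char) :
    (List.range (cs.length - 1)).map
      (fun k : Nat => ((pvOrdAt cs.reverse (k : Int) - pvOrdAt cs.reverse ((k : Int) + 1)).natAbs : Int))
      = (pvDiffs cs).reverse := by
  apply List.ext_getElem
  · simp [pvDiffs]
  · intro k h1 h2
    have hk : k < cs.length - 1 := by simpa using h1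
    have hA : pvOrdAt cs.reverse (k : Int) = (cs.reverse[k]'(by simp; omega)).toNat :=
      pvOrdAt_eq cs.reverse k (by simp; omega)
    have hcast : ((k : Int) + 1) = ((k + 1 : Nat) : Int) := by push_cast; ring
    have hB : pvOrdAt cs.reverse ((k : Int) + 1) = (cs.reverse[k+1]'(by simp; omega)).toNat := by
      rw [hcast]; exact pvOrdAt_eq cs.reverse (k+1) (by simp; omega)
    simp only [List.getElem_map, List.getElem_range, hA, hB, List.getElem_reverse]
    simp only [pvDiffs, List.getElem_zipWith, List.getElem_tail, List.length_zipWith,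
      List.length_tail]
    have e1 : cs.length - 1 - k = min cs.length (cs.length - 1) - 1 - k + 1 := by omega
    have e2 : cs.length - 1 - (k + 1) = min cs.length (cs.length - 1) - 1 - k := by omega
    simp only [e1, e2]
    omega

-- peeling one layer off a palindrome candidate
theorem pv_cons_concat_pal (a l : Int) (m : List Int) :
    (a :: (m ++ [l]) = (a :: (m ++ [l])).reverse) ↔ (a = l ∧ m = m.reverse) := by
  rw [List.reverse_cons, List.reverse_append]
  simp only [List.reverse_singleton, List.cons_append]
  constructor
  · intro h
    obtain ⟨h1, h2⟩ := List.cons.injEq .. ▸ h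
    subst h1
    exact ⟨rfl, (List.append_left_inj _).mp h2⟩
  · rintro ⟨rfl, hm⟩
    rw [← hm]; simp

-- B's two-end shrinking loop returns true exactly on palindromes
theorem pvPal_iff : ∀ (d : List Int), pvPal d = true ↔ d = d.reverse
  | [] => by simp [pvPal]
  | [a] => by simp [pvPal]
  | a :: b :: rest => by
    have hne : (b :: rest) ≠ [] := List.cons_ne_nil b rest
    have hdec := List.dropLast_concat_getLast hne
    set m := (b :: rest).dropLast with hm
    set l := (b :: rest).getLast hne with hl
    have hlen : m.length < rest.length + 2 := by
      have := congrArg List.length hdec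
      simp only [List.length_append, List.length_cons] at this
      omega
    have ih := pvPal_iff m
    rw [pvPal]
    show (if a = l then pvPal m else false) = true ↔ a :: b :: rest = (a :: b :: rest).reverse
    conv_rhs => rw [← hdec]
    rw [pv_cons_concat_pal]
    by_cases hal : a = l
    · rw [if_pos hal]; simp [hal, ih]
    · rw [if_neg hal]; simp [hal]
termination_by d => d.length

theorem pv_main (s : String) : funny_String s = funny_String_alt s := by
  unfold funny_String funny_String_alt
  dsimp only
  set cs := s.toList with hcs
  rw [PySem.List.pyRange_one]
  have hn : (((cs.reverse.length : Int)) - 1 - 0).toNat = cs.length - 1 := by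
    simp
  rw [hn, List.foldl_map, pv_foldl_pair]
  simp only [List.nil_append, zero_add]
  rw [pv_slist_eq cs]
  have hr := pv_rlist_eq cs
  rw [show (List.range (cs.length - 1)).map
      (fun k : Nat => ((pvOrdAt cs.reverse (k : Int) - pvOrdAt cs.reverse ((k : Int) + 1)).natAbs : Int))
      = (pvDiffs cs).reverse from hr]
  by_cases hp : pvPal (pvDiffs cs) = true
  · rw [if_pos ((pvPal_iff _).mp hp), if_pos hp]
  · rw [if_neg (fun h => hp ((pvPal_iff _).mpr h)), if_neg (by simpa using hp)]

-- ===== VERDICT (by name: the statement is the Claim_ definition above) =====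
theorem funny_String_spec : Claim_equal_funny_String := by
  intro s _
  unfold Spec_funny_String
  exact pv_main s
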